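-- pv_equiv track=rewrite | github.com/TeMyls/Programming_Problems | Rosalind/Rabbits and Recurrence Relations/fibonacci.py | rabbitPairs
-- ===== SOURCE A (Python) =====
-- def rabbitPairs(num_months,num_offspring):
--    #Massive Help
--    #https://medium.com/algorithms-for-life/rosalind-walkthrough-rabbits-and-recurrence-relations-4812c0c2ddb3
--    if num_months == 1:
--       return 1
--    elif num_months == 2:
--       return num_offspring
--
--    gen_one = rabbitPairs(num_months - 1,num_offspring)
--    gen_two = rabbitPairs(num_months - 2,num_offspring)
--    if num_months <= 4:
--       return gen_one + gen_two
--    return gen_one + (gen_two * num_offspring)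
-- ===== SOURCE B (Python) =====
-- def rabbitPairs(num_months, num_offspring):
--     # bottom-up iteration instead of A's exponential double recursion
--     if num_months == 1:
--         return 1
--     if num_months == 2:
--         return num_offspring
--     prev, cur = 1, num_offspring
--     for m in range(3, num_months + 1):
--         if m <= 4:
--             prev, cur = cur, cur + prev
--         else:
--             prev, cur = cur, cur + prev * num_offspring
--     return cur
-- ===== Notes on version B (the rewrite author's own statement) =====
-- stated objective: faster
-- what changed: Replaces A's exponential double recursion with a bottom-up two-variable iteration applying the same branch conditions; intended as faster (measured: A timed out at n=16 where B returned instantly, so no finite ratio could be taken).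
import Mathlib
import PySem

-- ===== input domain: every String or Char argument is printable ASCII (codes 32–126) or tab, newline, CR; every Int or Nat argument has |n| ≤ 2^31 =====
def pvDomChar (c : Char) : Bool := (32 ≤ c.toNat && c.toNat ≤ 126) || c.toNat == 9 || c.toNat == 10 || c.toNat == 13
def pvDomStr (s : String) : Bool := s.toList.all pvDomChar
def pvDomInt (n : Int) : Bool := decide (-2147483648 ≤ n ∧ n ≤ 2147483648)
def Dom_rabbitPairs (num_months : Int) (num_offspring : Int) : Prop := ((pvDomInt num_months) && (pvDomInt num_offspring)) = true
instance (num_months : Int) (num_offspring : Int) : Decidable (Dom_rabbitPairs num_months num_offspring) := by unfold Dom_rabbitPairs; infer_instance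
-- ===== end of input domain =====

-- B replaces A's exponential double recursion by a bottom-up two-variable loop with the same branch rule; intended as faster (a timing run saw A time out at n=16 where B returned, so no ratio was measurable).


-- ===== PORT A =====
-- A's recursion, fueled by the Nat value of num_months (exact for num_months ≥ 1, i.e. on Pre_;
-- for num_months ≤ 0 Python A raises RecursionError, which Pre_ excludes).
def rabbitPairsGoA : Nat → Int → Int
  | 0, _ => 0                     -- unreachable under Pre_
  | 1, _ => 1
  | 2, k => k
  | (m+3), k =>
      let gen_one := rabbitPairsGoA (m+2) k
      let gen_two := rabbitPairsGoA (m+1) k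
      if ((m : Int) + 3) ≤ 4 then gen_one + gen_two
      else gen_one + gen_two * k

def rabbitPairs (num_months : Int) (num_offspring : Int) : Int :=
  rabbitPairsGoA num_months.toNat num_offspring

-- ===== PORT B =====
def rabbitPairsStep (k : Int) (st : Int × Int) (m : Int) : Int × Int :=
  if m ≤ 4 then (st.2, st.2 + st.1) else (st.2, st.2 + st.1 * k)

def rabbitPairs_alt (num_months : Int) (num_offspring : Int) : Int :=
  if num_months = 1 then 1
  else if num_months = 2 then num_offspring
  else
    ((PySem.List.pyRange 3 (num_months + 1) 1).foldl
      (rabbitPairsStep num_offspring) (1, num_offspring)).2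

-- ===== PRECONDITION & SPEC =====
-- A raises RecursionError for num_months ≤ 0 (the recursion never reaches a base case); Pre_ excludes exactly those.
def Pre_rabbitPairs (num_months : Int) (num_offspring : Int) : Prop := 1 ≤ num_months
instance (num_months : Int) (num_offspring : Int) : Decidable (Pre_rabbitPairs num_months num_offspring) := by unfold Pre_rabbitPairs; infer_instance
def pvWitness_rabbitPairs : Int × Int := (7, 3)

def Spec_rabbitPairs (num_months : Int) (num_offspring : Int) (out : Int) : Prop := out = rabbitPairs_alt num_months num_offspring
instance (num_months : Int) (num_offspring : Int) (out : Int) : Decidable (Spec_rabbitPairs num_months num_offspring out) := by unfold Spec_rabbitPairs; infer_instance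

-- ===== CLAIM (what is proved, stated in full; the proofs are below) =====
def Claim_equal_rabbitPairs : Prop := ∀ (num_months : Int) (num_offspring : Int), Dom_rabbitPairs num_months num_offspring → Pre_rabbitPairs num_months num_offspring → Spec_rabbitPairs num_months num_offspring (rabbitPairs num_months num_offspring)

-- ===== LEMMAS AND PROOFS =====

-- loop invariant: after folding over range(3, n+1) the state is (f(n-1), f(n)) for n ≥ 2
theorem rabbitPairs_loop (k : Int) (n : Nat) (hn : 2 ≤ n) :
    (PySem.List.pyRange 3 ((n : Int) + 1) 1).foldl (rabbitPairsStep k) (1, k)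
      = (rabbitPairsGoA (n - 1) k, rabbitPairsGoA n k) := by
  induction n with
  | zero => omega
  | succ n ih =>
    rcases Nat.lt_or_ge n 2 with h | h
    · interval_cases n
      · omega
      · simp [PySem.List.pyRange_one_eq_nil, rabbitPairsGoA]
    · have hsplit : PySem.List.pyRange 3 ((n : Int) + 1 + 1) 1
          = PySem.List.pyRange 3 ((n : Int) + 1) 1 ++ [(n : Int) + 1] := by
        have : (3 : Int) ≤ (n : Int) + 1 := by omega
        simpa using PySem.List.pyRange_one_succ_right this
      have hcast : ((n + 1 : Nat) : Int) + 1 = (n : Int) + 1 + 1 := by push_cast; ring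
      rw [hcast, hsplit, List.foldl_append, ih h]
      obtain ⟨m, rfl⟩ : ∃ m, n = m + 2 := ⟨n - 2, by omega⟩
      simp only [rabbitPairsStep, List.foldl]
      have h1 : m + 2 + 1 - 1 = m + 2 := by omega
      have h2 : m + 2 - 1 = m + 1 := by omega
      rw [h1, h2]
      show _ = (rabbitPairsGoA (m + 2) k, rabbitPairsGoA (m + 3) k)
      simp only [rabbitPairsGoA]
      have hc : (((m : Int) + 2) + 1 ≤ 4) ↔ (((m : Int) + 3) ≤ 4) := by omega
      by_cases hm : ((m : Int) + 3) ≤ 4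
      · rw [if_pos (by push_cast; omega), if_pos hm]
      · rw [if_neg (by push_cast; omega), if_neg hm]

-- ===== VERDICT (by name: the statement is the Claim_ definition above) =====
theorem rabbitPairs_spec : Claim_equal_rabbitPairs := by
  intro n k _ hpre
  unfold Spec_rabbitPairs rabbitPairs rabbitPairs_alt
  have hpre' : (1 : Int) ≤ n := hpre
  by_cases h1 : n = 1
  · subst h1; simp [rabbitPairsGoA]
  · by_cases h2 : n = 2
    · subst h2; simp [rabbitPairsGoA]
    · rw [if_neg h1, if_neg h2]
      have hn2 : 2 ≤ n.toNat := by omega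
      have hc : ((n.toNat : Int)) = n := by omega
      have hloop := rabbitPairs_loop k n.toNat hn2
      rw [hc] at hloop
      rw [hloop]
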